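-- pv_equiv track=rewrite | github.com/Manoama/moc_labs | lab2/main.py | criteria_5_0
-- ===== SOURCE A (Python) =====
-- def criteria_5_0(x, sFreq, k):
--     j = 7
--     Bprh = list(sFreq.keys())[-j:]
--     boxes = {}
--     for b in Bprh:
--         boxes[b] = 0
--     for a in x:
--         if a in boxes:
--             boxes[a] += 1
--     f = 0
--     for val in boxes.values():
--         if val == 0:
--             f += 1
--     if f < k:
--         return 0
--     return 1
-- ===== SOURCE B (Python) =====
-- def criteria_5_0(x, sFreq, k):
--     xs = sorted(x)
--     n = len(xs)
--     missing = 0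
--     for b in list(sFreq)[-7:]:
--         lo, hi = 0, n
--         while lo < hi:
--             mid = (lo + hi) // 2
--             if xs[mid] < b:
--                 lo = mid + 1
--             else:
--                 hi = mid
--         if lo == n or xs[lo] != b:
--             missing += 1
--     return 1 if missing >= k else 0
-- ===== Notes on version B (the rewrite author's own statement) =====
-- stated objective: alternative
-- what changed: Replaces A's dict-based count-then-scan-for-zero-values structure by sorting x once and deciding presence of each of the last 7 keys with a hand-written lower-bound binary search over the sorted array, counting the misses directly.
import Mathlib
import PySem

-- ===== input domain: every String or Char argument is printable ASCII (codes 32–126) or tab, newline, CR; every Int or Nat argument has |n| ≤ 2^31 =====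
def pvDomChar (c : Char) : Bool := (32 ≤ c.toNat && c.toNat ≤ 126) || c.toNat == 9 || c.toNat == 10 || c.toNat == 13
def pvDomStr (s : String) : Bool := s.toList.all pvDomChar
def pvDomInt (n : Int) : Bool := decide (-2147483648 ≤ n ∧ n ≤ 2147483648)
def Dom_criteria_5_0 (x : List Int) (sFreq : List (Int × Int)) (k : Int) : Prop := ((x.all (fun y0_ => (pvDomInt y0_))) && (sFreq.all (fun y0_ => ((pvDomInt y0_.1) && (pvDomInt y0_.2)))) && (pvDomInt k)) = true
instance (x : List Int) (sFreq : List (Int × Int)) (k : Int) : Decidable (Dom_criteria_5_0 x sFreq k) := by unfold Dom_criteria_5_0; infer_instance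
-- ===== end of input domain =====

-- B drops A's dict of counts entirely: it sorts x once and decides presence of each of the
-- last 7 keys by a hand-written lower-bound binary search; objective: alternative algorithm.

-- ===== PORT A =====
def criteria_5_0 (x : List Int) (sFreq : List (Int × Int)) (k : Int) : Int :=
  let j : Int := 7
  let Bprh := PySem.List.slice (PySem.Dict.ofList sFreq).keys (some (-j)) none
  let boxes0 : PySem.Dict Int Int := Bprh.foldl (fun d b => d.insert b 0) PySem.Dict.empty
  let boxes := x.foldl (fun d a => if d.contains a then d.modify a 0 (· + 1) else d) boxes0
  let f : Int := boxes.values.foldl (fun f val => if val == 0 then f + 1 else f) 0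
  if f < k then 0 else 1

-- ===== PORT B =====
-- B's while-loop lower-bound binary search, transcribed as recursion on (hi - lo).
-- The index mid is always in range (lo ≤ mid < hi ≤ length), so getD is exact for xs[mid].
def pvLB (xs : List Int) (b : Int) (lo hi : Nat) : Nat :=
  if lo < hi then
    let mid := (lo + hi) / 2
    if xs.getD mid 0 < b then pvLB xs b (mid + 1) hi else pvLB xs b lo mid
  else lo
termination_by hi - lo
decreasing_by all_goals omega

def criteria_5_0_alt (x : List Int) (sFreq : List (Int × Int)) (k : Int) : Int :=
  let xs := PySem.List.sorted x (fun v => v) false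
  let n := xs.length
  let missing : Int :=
    (PySem.List.slice (PySem.Dict.ofList sFreq).keys (some (-7)) none).foldl
      (fun m b =>
        let lo := pvLB xs b 0 n
        if lo == n || !(xs.getD lo 0 == b) then m + 1 else m) 0
  if missing ≥ k then 1 else 0

-- ===== PRECONDITION & SPEC =====
def Spec_criteria_5_0 (x : List Int) (sFreq : List (Int × Int)) (k : Int) (out : Int) : Prop := out = criteria_5_0_alt x sFreq k
instance (x : List Int) (sFreq : List (Int × Int)) (k : Int) (out : Int) : Decidable (Spec_criteria_5_0 x sFreq k out) := by unfold Spec_criteria_5_0; infer_instance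

-- ===== CLAIM (what is proved, stated in full; the proofs are below) =====
def Claim_equal_criteria_5_0 : Prop := ∀ (x : List Int) (sFreq : List (Int × Int)) (k : Int), Dom_criteria_5_0 x sFreq k → Spec_criteria_5_0 x sFreq k (criteria_5_0 x sFreq k)

-- ===== LEMMAS AND PROOFS =====

-- A's guarded counting loop never changes the key set.
theorem pv_keys_countLoop (l : List Int) (d : PySem.Dict Int Int) :
    (l.foldl (fun d a => if d.contains a then d.modify a 0 (· + 1) else d) d).keys = d.keys := by
  induction l generalizing d with
  | nil => rfl
  | cons a l ih =>
    simp only [List.foldl_cons]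
    by_cases h : d.contains a = true
    · rw [if_pos h, ih, PySem.Dict.keys_modify]
      exact PySem.Dict.keys_insert_of_contains _ _ h
    · rw [if_neg h, ih]

-- Value of A's counting loop at any key: add the count of that key in l if the key is present.
theorem pv_getD_countLoop (l : List Int) (d : PySem.Dict Int Int) (b : Int) :
    (l.foldl (fun d a => if d.contains a then d.modify a 0 (· + 1) else d) d).getD b 0 =
      d.getD b 0 + (if d.contains b = true then (l.count b : Int) else 0) := by
  induction l generalizing d with
  | nil => simp
  | cons a l ih =>
    simp only [List.foldl_cons]
    by_cases ha : d.contains a = true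
    · rw [if_pos ha, ih]
      by_cases hb : b = a
      · subst hb
        simp [PySem.Dict.contains_modify, ha]
        ring
      · have hab : ¬ a = b := fun h => hb h.symm
        simp [PySem.Dict.getD_modify, PySem.Dict.contains_modify, hb, hab]
    · rw [if_neg ha, ih]
      by_cases hb : b = a
      · subst hb
        simp [ha]
      · have hab : ¬ a = b := fun h => hb h.symm
        simp [hab]

-- A's initialisation loop leaves every key's value (with default 0) at 0.
theorem pv_getD_insertZero (l : List Int) (d : PySem.Dict Int Int) (b : Int)
    (h : d.getD b 0 = 0) :
    (l.foldl (fun d b => d.insert b 0) d).getD b 0 = 0 := by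
  induction l generalizing d with
  | nil => simpa using h
  | cons a l ih =>
    simp only [List.foldl_cons]
    apply ih
    rw [PySem.Dict.getD_insert]
    split <;> simp [h]

-- Invariant of B's binary search: on a (getD-)monotone list, it returns the split point
-- between the elements < b and the elements ≥ b, refining a given bracketing.
theorem pvLB_spec (xs : List Int) (b : Int)
    (hs : ∀ p q : Nat, p ≤ q → q < xs.length → xs.getD p 0 ≤ xs.getD q 0) :
    ∀ d lo hi : Nat, hi - lo ≤ d → lo ≤ hi → hi ≤ xs.length →
    (∀ i, i < lo → xs.getD i 0 < b) →
    (∀ i, hi ≤ i → i < xs.length → b ≤ xs.getD i 0) →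
    lo ≤ pvLB xs b lo hi ∧ pvLB xs b lo hi ≤ hi ∧
    (∀ i, i < pvLB xs b lo hi → xs.getD i 0 < b) ∧
    (∀ i, pvLB xs b lo hi ≤ i → i < xs.length → b ≤ xs.getD i 0) := by
  intro d
  induction d with
  | zero =>
    intro lo hi hd hlh hhi hlt hge
    have : ¬ lo < hi := by omega
    rw [pvLB, if_neg this]
    exact ⟨le_refl _, hlh, hlt, fun i hli hil => hge i (by omega) hil⟩
  | succ d ih =>
    intro lo hi hd hlh hhi hlt hge
    by_cases h : lo < hi
    · rw [pvLB, if_pos h]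
      simp only []
      set mid := (lo + hi) / 2 with hmid
      have hm1 : lo ≤ mid := by omega
      have hm2 : mid < hi := by omega
      by_cases hc : xs.getD mid 0 < b
      · rw [if_pos hc]
        obtain ⟨a1, a2, a3, a4⟩ := ih (mid + 1) hi (by omega) (by omega) hhi
          (fun i hi' => lt_of_le_of_lt (hs i mid (by omega) (by omega)) hc) hge
        exact ⟨by omega, a2, a3, a4⟩
      · rw [if_neg hc]
        replace hc : b ≤ xs.getD mid 0 := by omega
        obtain ⟨a1, a2, a3, a4⟩ := ih lo mid (by omega) (by omega) (by omega) hlt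
          (fun i hmi hil => le_trans hc (hs mid i hmi hil))
        exact ⟨a1, by omega, a3, a4⟩
    · rw [pvLB, if_neg h]
      exact ⟨le_refl _, hlh, hlt, fun i hli hil => hge i (by omega) hil⟩

-- B's miss test on sorted x decides non-membership in x.
theorem pvLB_miss (x : List Int) (b : Int) :
    (let xs := PySem.List.sorted x (fun v => v) false
     let lo := pvLB xs b 0 xs.length
     (lo == xs.length || !(xs.getD lo 0 == b))) = !decide (b ∈ x) := by
  simp only []
  set xs := PySem.List.sorted x (fun v => v) false with hxs
  have hs : ∀ p q : Nat, p ≤ q → q < xs.length → xs.getD p 0 ≤ xs.getD q 0 := by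
    intro p q hpq hq
    have hp : p < xs.length := lt_of_le_of_lt hpq hq
    rw [List.getD_eq_getElem _ _ hp, List.getD_eq_getElem _ _ hq]
    exact PySem.List.sorted_id_getElem_mono x hpq hq
  obtain ⟨h1, h2, h3, h4⟩ := pvLB_spec xs b hs xs.length 0 xs.length (by omega) (by omega)
    (le_refl _) (by omega) (fun i h hi' => by omega)
  set lo := pvLB xs b 0 xs.length with hlo
  have hmem : b ∈ x ↔ b ∈ xs := (PySem.List.mem_sorted x (fun v => v) false b).symm
  by_cases hx : b ∈ x
  · -- b occurs in xs at some index j; show lo < length and xs[lo] = b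
    obtain ⟨j, hj, hjb⟩ := List.getElem_of_mem (hmem.1 hx)
    have hjD : xs.getD j 0 = b := by rw [List.getD_eq_getElem _ _ hj, hjb]
    have hjlo : lo ≤ j := by
      by_contra hcon
      exact absurd hjD (by have := h3 j (by omega); omega)
    have hlol : lo < xs.length := by omega
    have hb1 : b ≤ xs.getD lo 0 := h4 lo (le_refl _) hlol
    have hb2 : xs.getD lo 0 ≤ xs.getD j 0 := hs lo j hjlo hj
    have heq : xs.getD lo 0 = b := by omega
    have hne : ¬ lo = xs.length := by omega
    simp [hx]
    exact ⟨hne, by simpa using heq⟩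
  · by_cases hl : lo = xs.length
    · simp [hx, hl]
    · have hlol : lo < xs.length := by omega
      have hne : xs.getD lo 0 ≠ b := by
        intro hcon
        exact hx (hmem.2 (hcon ▸ List.getD_eq_getElem _ _ hlol ▸ List.getElem_mem hlol))
      simp [hx, hl]
      simpa using hne

-- ===== VERDICT (by name: the statement is the Claim_ definition above) =====
theorem criteria_5_0_spec : Claim_equal_criteria_5_0 := by
  intro x sFreq k _
  unfold Spec_criteria_5_0 criteria_5_0 criteria_5_0_alt
  simp only []
  set B := PySem.List.slice (PySem.Dict.ofList sFreq).keys (some (-7)) none with hB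
  have hBnd : B.Nodup := by
    rw [hB, PySem.List.slice_from_neg_ofNat _ 7 (by omega)]
    exact (PySem.Dict.nodup_keys_ofList sFreq).sublist (List.drop_sublist _ _)
  set boxes0 : PySem.Dict Int Int := B.foldl (fun d b => d.insert b 0) PySem.Dict.empty with hb0
  set boxes := x.foldl (fun d a => if d.contains a then d.modify a 0 (· + 1) else d) boxes0 with hbx
  have hkeys0 : boxes0.keys = B := by
    rw [hb0, PySem.Dict.keys_foldl_insert (f := fun _ _ => (0 : Int))]
    simp [PySem.Set.update_nil_left, PySem.Set.ofList_eq_self_of_nodup _ hBnd]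
  have hkeys : boxes.keys = B := by rw [hbx, pv_keys_countLoop, hkeys0]
  have hcont : ∀ b : Int, boxes0.contains b = true ↔ b ∈ B := by
    intro b; rw [PySem.Dict.contains_iff_mem_keys, hkeys0]
  have hvals : boxes.values = B.map (fun b => boxes.getD b 0) := by
    rw [PySem.Dict.values_eq_map_keys boxes (hkeys ▸ hBnd) 0, hkeys]
  have hget : ∀ b ∈ B, boxes.getD b 0 = (x.count b : Int) := by
    intro b hb
    rw [hbx, pv_getD_countLoop, pv_getD_insertZero _ _ _ (by simp),
      if_pos ((hcont b).2 hb)]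
    ring
  -- A's f is a countP over B of absence from x
  rw [hvals, PySem.List.foldl_count_if (fun v => v == 0), List.countP_map]
  have hA : B.countP ((fun v => v == 0) ∘ fun b => boxes.getD b 0)
      = B.countP (fun b => !decide (b ∈ x)) := by
    apply List.countP_congr
    intro b hb
    simp only [Function.comp, hget b hb]
    by_cases hx : b ∈ x
    · simp [List.count_eq_zero, hx]
    · simp [List.count_eq_zero, hx]
  rw [hA]
  -- B's missing is the same countP, via the binary-search characterisation
  rw [PySem.List.foldl_count_if (fun b =>
    let lo := pvLB (PySem.List.sorted x (fun v => v) false) b 0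
      (PySem.List.sorted x (fun v => v) false).length
    (lo == (PySem.List.sorted x (fun v => v) false).length ||
      !((PySem.List.sorted x (fun v => v) false).getD lo 0 == b)))]
  have hBc : B.countP (fun b =>
      let lo := pvLB (PySem.List.sorted x (fun v => v) false) b 0
        (PySem.List.sorted x (fun v => v) false).length
      (lo == (PySem.List.sorted x (fun v => v) false).length ||
        !((PySem.List.sorted x (fun v => v) false).getD lo 0 == b)))
      = B.countP (fun b => !decide (b ∈ x)) := by
    apply List.countP_congr
    intro b _
    exact iff_of_eq (congrArg (· = true) (pvLB_miss x b))
  rw [hBc]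
  split_ifs <;> omega
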